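-- pv_equiv track=rewrite | github.com/mcp-tool-shop-org/portlight | src/portlight/engine/underworld.py | tick_underworld
-- ===== SOURCE A (Python) =====
-- def tick_underworld(
--     underworld_standing: dict[str, int],
--     underworld_heat: int,
--     days: int = 1,
-- ) -> int:
--     """Daily tick: underworld heat decays slowly. Returns new heat value."""
--     for _ in range(days):
--         if underworld_heat > 0:
--             underworld_heat = max(0, underworld_heat - 1)
--     return underworld_heat
-- ===== SOURCE B (Python) =====
-- def tick_underworld(
--     underworld_standing: dict[str, int],
--     underworld_heat: int,
--     days: int = 1,
-- ) -> int:
--     """Daily tick: underworld heat decays slowly. Returns new heat value."""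
--     if underworld_heat <= 0 or days <= 0:
--         return underworld_heat
--     return max(0, underworld_heat - days)
-- ===== Notes on version B (the rewrite author's own statement) =====
-- stated objective: faster
-- what changed: Replaced the O(days) decrement loop with a closed-form clamp: heat unchanged if heat<=0 or days<=0, else max(0, heat-days).
import Mathlib
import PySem

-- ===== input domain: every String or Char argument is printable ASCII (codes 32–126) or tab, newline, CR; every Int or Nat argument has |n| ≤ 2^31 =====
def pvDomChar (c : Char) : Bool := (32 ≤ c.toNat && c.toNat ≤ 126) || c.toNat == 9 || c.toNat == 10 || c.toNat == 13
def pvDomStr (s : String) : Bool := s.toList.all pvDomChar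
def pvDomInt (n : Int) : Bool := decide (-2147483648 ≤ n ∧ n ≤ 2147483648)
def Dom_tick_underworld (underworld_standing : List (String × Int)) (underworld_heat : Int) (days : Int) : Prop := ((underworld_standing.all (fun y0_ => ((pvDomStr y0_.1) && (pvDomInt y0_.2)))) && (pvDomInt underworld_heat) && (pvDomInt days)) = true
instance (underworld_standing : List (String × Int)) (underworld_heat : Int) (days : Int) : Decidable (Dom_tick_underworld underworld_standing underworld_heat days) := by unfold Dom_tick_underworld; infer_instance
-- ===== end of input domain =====

-- ===== PORT A =====
-- A: loop range(days), decrementing heat while positive (transliteration of the Python loop).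
def tick_underworld (underworld_standing : List (String × Int)) (underworld_heat : Int) (days : Int) : Int :=
  (PySem.List.pyRange 0 days 1).foldl
    (fun h _ => if h > 0 then max 0 (h - 1) else h) underworld_heat

-- ===== PORT B =====
-- B: closed form, O(1) instead of O(days).
def tick_underworld_alt (underworld_standing : List (String × Int)) (underworld_heat : Int) (days : Int) : Int :=
  if underworld_heat ≤ 0 ∨ days ≤ 0 then underworld_heat
  else max 0 (underworld_heat - days)

-- ===== PRECONDITION & SPEC =====
def Spec_tick_underworld (underworld_standing : List (String × Int)) (underworld_heat : Int) (days : Int) (out : Int) : Prop := out = tick_underworld_alt underworld_standing underworld_heat days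
instance (underworld_standing : List (String × Int)) (underworld_heat : Int) (days : Int) (out : Int) : Decidable (Spec_tick_underworld underworld_standing underworld_heat days out) := by unfold Spec_tick_underworld; infer_instance

-- ===== CLAIM (what is proved, stated in full; the proofs are below) =====
def Claim_equal_tick_underworld : Prop := ∀ (underworld_standing : List (String × Int)) (underworld_heat : Int) (days : Int), Dom_tick_underworld underworld_standing underworld_heat days → Spec_tick_underworld underworld_standing underworld_heat days (tick_underworld underworld_standing underworld_heat days)

-- ===== LEMMAS AND PROOFS =====

-- ===== VERDICT (by name: the statement is the Claim_ definition above) =====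
-- The loop body folded over any list of length n yields the clamped closed form.
theorem tick_fold_closed (l : List Int) (h : Int) :
    l.foldl (fun h _ => if h > 0 then max 0 (h - 1) else h) h
      = if h ≤ 0 then h else max 0 (h - l.length) := by
  induction l generalizing h with
  | nil => simp; omega
  | cons a t ih =>
    simp only [List.foldl_cons, List.length_cons, ih]
    split_ifs <;> omega

theorem tick_underworld_spec : Claim_equal_tick_underworld := by
  intro us h d _
  unfold Spec_tick_underworld tick_underworld tick_underworld_alt
  rw [tick_fold_closed]
  have hlen : ((PySem.List.pyRange 0 d 1).length : Int) = max 0 d := by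
    rw [PySem.List.length_pyRange_one]; omega
  rw [hlen]
  split_ifs <;> omega
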